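-- pv_equiv track=rewrite | github.com/czaky/puzzles | arrays.py | compress_geek_road
-- ===== SOURCE A (Python) =====
-- def compress_geek_road(r: list[int], sections: set) -> list[tuple]:
--     """Compress the road `r` representation.
--
--     The road is compressed into the following representation:
--         (<baggage>, <intersection-value>, <intersection-length>).
--
--     where:
--         - baggage is the sum of all values since the last intersection.
--         - intersection-value is the number of balls shared between roads.
--         - intersection-length is the count of the intersection buckets
--             repeating with the same intersection-value.
--
--     Args:
--     ----
--         r (List[int]): road consisting of counts of balls
--         sections (set): counts of balls that mark intersections
--
--     Returns:
--     -------
--         List(tuple): list of tuples describing intersections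
--             and values in-between.
--
--     """
--     c = []
--     i = 0
--     while i < len(r):
--         b = 0  # baggage collected on the way
--         while i < len(r) and r[i] not in sections:
--             b += r[i]
--             i += 1
--         # Intersection value.
--         jv = r[i] if i < len(r) else 0
--         # Intersection length.
--         jc = 0
--         while i < len(r) and r[i] == jv:
--             jc += 1
--             i += 1
--         c.append((b, jv, jc))
--     return c
-- ===== SOURCE B (Python) =====
-- def compress_geek_road(r: list[int], sections: set) -> list[tuple]:
--     # Two-pass: run-length-encode the road, then classify runs into
--     # section tuples vs. baggage, with a pending flag for a trailing tuple.
--     runs = []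
--     for v in r:
--         if runs and runs[-1][0] == v:
--             runs[-1][1] += 1
--         else:
--             runs.append([v, 1])
--     out = []
--     b = 0
--     pending = False
--     for v, n in runs:
--         if v in sections:
--             out.append((b, v, n))
--             b = 0
--             pending = False
--         else:
--             b += v * n
--             pending = True
--     if pending:
--         out.append((b, 0, 0))
--     return out
-- ===== Notes on version B (the rewrite author's own statement) =====
-- stated objective: simpler
-- what changed: Replaces A's nested index-sharing while-loops with two independent passes: run-length-encode the road, then classify each run as section tuple or baggage with a pending flag for the trailing tuple.
import Mathlib
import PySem

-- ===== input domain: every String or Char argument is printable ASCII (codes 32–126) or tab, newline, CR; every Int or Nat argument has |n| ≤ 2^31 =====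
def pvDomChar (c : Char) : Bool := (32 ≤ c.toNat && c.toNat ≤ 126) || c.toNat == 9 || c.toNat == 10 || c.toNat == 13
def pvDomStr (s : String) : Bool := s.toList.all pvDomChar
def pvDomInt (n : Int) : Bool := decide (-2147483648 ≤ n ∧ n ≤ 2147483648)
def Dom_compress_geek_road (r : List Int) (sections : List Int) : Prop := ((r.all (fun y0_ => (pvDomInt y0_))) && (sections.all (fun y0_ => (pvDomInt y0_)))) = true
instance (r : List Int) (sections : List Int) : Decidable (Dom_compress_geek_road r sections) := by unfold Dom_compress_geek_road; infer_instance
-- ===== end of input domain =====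

-- B restructures A's nested index-sharing while-loops into two passes (run-length
-- encode, then classify runs); objective: simpler, same asymptotic cost.

-- ===== PORT A =====
-- inner `while i < len(r) and r[i] not in sections: b += r[i]; i += 1`
def baggLoop (s : List Int) : Int → List Int → Int × List Int
  | b, [] => (b, [])
  | b, x :: xs => if x ∈ s then (b, x :: xs) else baggLoop s (b + x) xs

-- inner `while i < len(r) and r[i] == jv: jc += 1; i += 1`
def runLoop (jv : Int) : Int → List Int → Int × List Int
  | jc, [] => (jc, [])
  | jc, x :: xs => if x = jv then runLoop jv (jc + 1) xs else (jc, x :: xs)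

theorem baggLoop_len (s : List Int) (b : Int) (l : List Int) :
    (baggLoop s b l).2.length ≤ l.length := by
  induction l generalizing b with
  | nil => simp [baggLoop]
  | cons x xs ih =>
    simp only [baggLoop]
    split
    · simp
    · exact le_trans (ih _) (by simp)

theorem runLoop_len (jv : Int) (jc : Int) (l : List Int) :
    (runLoop jv jc l).2.length ≤ l.length := by
  induction l generalizing jc with
  | nil => simp [runLoop]
  | cons x xs ih =>
    simp only [runLoop]
    split
    · exact le_trans (ih _) (by simp)
    · simp

-- outer `while i < len(r)` of A: each iteration collects baggage, reads the
-- intersection value (0 past the end), counts its run, appends one tuple.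
def outerA (s : List Int) (l : List Int) : List (Int × Int × Int) :=
  match l with
  | [] => []
  | x :: xs =>
    match hp : (baggLoop s 0 (x :: xs)).2 with
    | [] => [((baggLoop s 0 (x :: xs)).1, 0, 0)]
    | y :: ys => ((baggLoop s 0 (x :: xs)).1, y, (runLoop y 1 ys).1) :: outerA s ((runLoop y 1 ys).2)
termination_by l.length
decreasing_by
  have h1 := baggLoop_len s 0 (x :: xs)
  rw [hp] at h1
  have h2 := runLoop_len y 1 ys
  simp only [List.length_cons] at h1 ⊢
  omega

def compress_geek_road (r : List Int) (sections : List Int) : List (Int × Int × Int) :=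
  outerA sections r

-- ===== PORT B =====
-- first pass of Source B: build the run-length encoding; `runs[-1]` is the head of
-- the reversed accumulator, reversed back at the end.
def rleLoop : List (Int × Int) → List Int → List (Int × Int)
  | acc, [] => acc.reverse
  | acc, v :: vs =>
    match acc with
    | (w, n) :: rest => if w = v then rleLoop ((w, n + 1) :: rest) vs
                        else rleLoop ((v, 1) :: (w, n) :: rest) vs
    | [] => rleLoop [(v, 1)] vs

-- second pass of Source B: classify runs, maintaining baggage `b` and `pending`.
def classify (s : List Int) : Int → Bool → List (Int × Int) → List (Int × Int × Int)
  | b, pending, [] => if pending then [(b, 0, 0)] else []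
  | b, _, (v, n) :: rest =>
    if v ∈ s then (b, v, n) :: classify s 0 false rest
    else classify s (b + v * n) true rest

def compress_geek_road_alt (r : List Int) (sections : List Int) : List (Int × Int × Int) :=
  classify sections 0 false (rleLoop [] r)

-- ===== PRECONDITION & SPEC =====
def Spec_compress_geek_road (r : List Int) (sections : List Int) (out : List (Int × Int × Int)) : Prop := out = compress_geek_road_alt r sections
instance (r : List Int) (sections : List Int) (out : List (Int × Int × Int)) : Decidable (Spec_compress_geek_road r sections out) := by unfold Spec_compress_geek_road; infer_instance

-- ===== CLAIM (what is proved, stated in full; the proofs are below) =====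
def Claim_equal_compress_geek_road : Prop := ∀ (r : List Int) (sections : List Int), Dom_compress_geek_road r sections → Spec_compress_geek_road r sections (compress_geek_road r sections)

-- ===== LEMMAS AND PROOFS =====

-- A right-to-left run-length encoder, used as the reasoning intermediate.
def rleSimple : List Int → List (Int × Int)
  | [] => []
  | v :: vs =>
    match rleSimple vs with
    | (w, n) :: rest => if w = v then (v, n + 1) :: rest else (v, 1) :: (w, n) :: rest
    | [] => [(v, 1)]

theorem rleLoop_acc (l : List Int) : ∀ (acc : List (Int × Int)) (w n : Int),
    rleLoop ((w, n) :: acc) l =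
      acc.reverse ++ (match rleSimple l with
        | (v, m) :: rest => if v = w then (w, n + m) :: rest else (w, n) :: (v, m) :: rest
        | [] => [(w, n)]) := by
  induction l with
  | nil => intro acc w n; simp [rleLoop, rleSimple]
  | cons x xs ih =>
    intro acc w n
    simp only [rleLoop]
    by_cases hw : w = x
    · rw [if_pos hw]
      subst hw
      rw [ih acc w (n + 1)]
      congr 1
      rcases h : rleSimple xs with _ | ⟨⟨v, m⟩, rest⟩
      · simp [rleSimple, h]
      · by_cases hv : v = w
        · subst hv
          simp only [rleSimple, h]
          simp
          omega
        · simp [rleSimple, h, hv]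
    · rw [if_neg hw]
      rw [ih ((w, n) :: acc) x 1]
      simp only [List.reverse_cons, List.append_assoc, List.singleton_append]
      congr 1
      rcases h : rleSimple xs with _ | ⟨⟨v, m⟩, rest⟩
      · simp [rleSimple, h, Ne.symm hw]
      · by_cases hv : v = x
        · subst hv
          have h1m : (1 : Int) + m = m + 1 := by ring
          simp [rleSimple, h, Ne.symm hw, h1m]
        · simp [rleSimple, h, hv, Ne.symm hw]

theorem rleLoop_eq_rleSimple (l : List Int) : rleLoop [] l = rleSimple l := by
  cases l with
  | nil => simp [rleLoop, rleSimple]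
  | cons x xs =>
    simp only [rleLoop]
    rw [rleLoop_acc]
    simp only [List.reverse_nil, List.nil_append]
    rcases h : rleSimple xs with _ | ⟨⟨v, m⟩, rest⟩
    · simp [rleSimple, h]
    · by_cases hv : v = x
      · subst hv
        have h1m : (1 : Int) + m = m + 1 := by ring
        simp [rleSimple, h, h1m]
      · simp [rleSimple, h, hv]

theorem runLoop_shift (l : List Int) : ∀ (x n : Int),
    runLoop x n l = (n + (runLoop x 0 l).1, (runLoop x 0 l).2) := by
  induction l with
  | nil => intro x n; simp [runLoop]
  | cons y ys ih =>
    intro x n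
    simp only [runLoop]
    by_cases hy : y = x
    · rw [if_pos hy, if_pos hy, ih x (n + 1), ih x (0 + 1)]
      simp only [Prod.mk.injEq]
      exact ⟨by ring, trivial⟩
    · simp [hy]

theorem runLoop_cons_self (y n : Int) (ys : List Int) :
    runLoop y n (y :: ys) = ((runLoop y n ys).1 + 1, (runLoop y n ys).2) := by
  simp only [runLoop]
  rw [runLoop_shift ys y (n + 1), runLoop_shift ys y n]
  have : n + 1 + (runLoop y 0 ys).1 = n + (runLoop y 0 ys).1 + 1 := by ring
  simp [this]

-- peel the leading run: rleSimple (x :: xs) = (x, leading-run length) :: rleSimple (rest)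
theorem rleSimple_peel (xs : List Int) : ∀ (x : Int),
    rleSimple (x :: xs) = (x, (runLoop x 1 xs).1) :: rleSimple ((runLoop x 1 xs).2)
      ∧ ((runLoop x 1 xs).2).head? ≠ some x := by
  induction xs with
  | nil => intro x; simp [rleSimple, runLoop]
  | cons y ys ih =>
    intro x
    by_cases hy : y = x
    · subst hy
      obtain ⟨h1, h2⟩ := ih y
      have hr2 := runLoop_cons_self y 1 ys
      refine ⟨?_, ?_⟩
      · rw [hr2]
        show rleSimple (y :: y :: ys) = _
        conv_lhs => rw [rleSimple]
        rw [h1]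
        simp
      · rw [hr2]
        exact h2
    · have hr : runLoop x 1 (y :: ys) = (1, y :: ys) := by simp [runLoop, hy]
      refine ⟨?_, ?_⟩
      · rw [hr]
        show rleSimple (x :: y :: ys) = (x, 1) :: rleSimple (y :: ys)
        conv_lhs => rw [rleSimple]
        rw [(ih y).1]
        simp [hy, ← (ih y).1]
      · rw [hr]
        simp [hy]

-- structural reformulation of A's baggage phase (baggage plus one appended tuple)
def bagPhase (s : List Int) : Int → List Int → List (Int × Int × Int)
  | b, [] => [(b, 0, 0)]
  | b, x :: xs =>
    if x ∈ s then (b, x, (runLoop x 1 xs).1) :: outerA s ((runLoop x 1 xs).2)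
    else bagPhase s (b + x) xs

theorem bagPhase_of_bagg (s : List Int) (l : List Int) : ∀ (b : Int),
    bagPhase s b l =
      (match (baggLoop s b l).2 with
        | [] => [((baggLoop s b l).1, 0, 0)]
        | y :: ys => ((baggLoop s b l).1, y, (runLoop y 1 ys).1) :: outerA s ((runLoop y 1 ys).2)) := by
  induction l with
  | nil => intro b; simp [baggLoop, bagPhase]
  | cons x xs ih =>
    intro b
    by_cases hx : x ∈ s
    · simp only [bagPhase, if_pos hx, baggLoop]
    · simp only [bagPhase, if_neg hx, baggLoop]
      exact ih (b + x)

theorem outerA_nil (s : List Int) : outerA s [] = [] := by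
  rw [outerA]

theorem outerA_cons (s : List Int) (x : Int) (xs : List Int) :
    outerA s (x :: xs) = bagPhase s 0 (x :: xs) := by
  rw [outerA, bagPhase_of_bagg]
  split <;> rename_i heq <;> rw [heq]

-- consuming a whole leading non-section run at once in the baggage phase
theorem bagPhase_run (s : List Int) (xs : List Int) : ∀ (x b : Int), x ∉ s →
    bagPhase s b (x :: xs) = bagPhase s (b + x * (runLoop x 1 xs).1) ((runLoop x 1 xs).2) := by
  induction xs with
  | nil =>
    intro x b hx
    simp [bagPhase, runLoop, if_neg hx]
  | cons y ys ih =>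
    intro x b hx
    by_cases hy : y = x
    · subst hy
      have step : bagPhase s b (y :: y :: ys) = bagPhase s (b + y) (y :: ys) := by
        simp [bagPhase, if_neg hx]
      rw [step, ih y (b + y) hx, runLoop_cons_self y 1 ys]
      have harith : b + y + y * (runLoop y 1 ys).1 = b + y * ((runLoop y 1 ys).1 + 1) := by ring
      rw [harith]
    · have hr : runLoop x 1 (y :: ys) = (1, y :: ys) := by simp [runLoop, hy]
      rw [hr]
      have harith : b + x * 1 = b + x := by ring
      rw [harith]
      simp [bagPhase, if_neg hx]
theorem main_equiv (n : ℕ) : ∀ (l : List Int), l.length ≤ n → ∀ (s : List Int) (b : Int),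
    classify s b true (rleSimple l) = bagPhase s b l
    ∧ classify s 0 false (rleSimple l) = outerA s l := by
  induction n with
  | zero =>
    intro l hl s b
    have : l = [] := List.eq_nil_of_length_eq_zero (Nat.le_zero.mp hl)
    subst this
    simp [rleSimple, classify, bagPhase, outerA_nil]
  | succ n ih =>
    intro l hl s b
    cases l with
    | nil => simp [rleSimple, classify, bagPhase, outerA_nil]
    | cons x xs =>
      obtain ⟨hpeel, -⟩ := rleSimple_peel xs x
      have hlen : ((runLoop x 1 xs).2).length ≤ n := by
        have := runLoop_len x 1 xs
        simp only [List.length_cons] at hl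
        omega
      have ihr := fun b => ih ((runLoop x 1 xs).2) hlen s b
      by_cases hx : x ∈ s
      · constructor
        · rw [hpeel]
          simp only [classify, if_pos hx]
          rw [(ihr 0).2]
          simp [bagPhase, hx]
        · rw [hpeel]
          simp only [classify, if_pos hx]
          rw [(ihr 0).2, outerA_cons]
          simp [bagPhase, hx]
      · constructor
        · rw [hpeel]
          simp only [classify, if_neg hx]
          rw [(ihr (b + x * (runLoop x 1 xs).1)).1]
          exact (bagPhase_run s xs x b hx).symm
        · rw [hpeel]
          simp only [classify, if_neg hx]
          rw [(ihr (0 + x * (runLoop x 1 xs).1)).1, outerA_cons, bagPhase_run s xs x 0 hx]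

-- ===== VERDICT (by name: the statement is the Claim_ definition above) =====
theorem compress_geek_road_spec : Claim_equal_compress_geek_road := by
  intro r sections _
  show compress_geek_road r sections = compress_geek_road_alt r sections
  unfold compress_geek_road compress_geek_road_alt
  rw [rleLoop_eq_rleSimple]
  exact ((main_equiv r.length r le_rfl sections 0).2).symm
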